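-- pv_equiv track=rewrite | github.com/edoules/S3NLabelEditor | lib_s3py/main_helper.py | insert_gaps
-- ===== SOURCE A (Python) =====
-- def insert_gaps(q, a):#, debug = False):
--     #if debug: print >>stderr, 'main_helper.py', q
--     #if debug: print >>stderr, 'main_helper.py', a
--     #if debug: print >>stderr, 'main_helper.py', len(q), len(a), len([aa for aa in a if aa != '-'])
--     retlist = []
--     iq = 0
--     for i, aa in enumerate(a):
--         #if debug: print >>stderr, i, iq, aa, q[iq] if iq < len(q) else '!'
--         if aa in '-':
--             retlist += [None]
--         else:
--             retlist += [q[iq]]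
--             iq += 1
--     return retlist
-- ===== SOURCE B (Python) =====
-- def insert_gaps(q, a):
--     positions = [i for i, aa in enumerate(a) if aa not in '-']
--     result = [None] * len(a)
--     for k, pos in enumerate(positions):
--         result[pos] = q[k]
--     return result
-- ===== Notes on version B (the rewrite author's own statement) =====
-- stated objective: alternative
-- what changed: B first builds the table of non-gap positions, allocates a [None]*len(a) buffer and scatters q into it by index assignment, instead of A's single append loop with a running counter.
import Mathlib
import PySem

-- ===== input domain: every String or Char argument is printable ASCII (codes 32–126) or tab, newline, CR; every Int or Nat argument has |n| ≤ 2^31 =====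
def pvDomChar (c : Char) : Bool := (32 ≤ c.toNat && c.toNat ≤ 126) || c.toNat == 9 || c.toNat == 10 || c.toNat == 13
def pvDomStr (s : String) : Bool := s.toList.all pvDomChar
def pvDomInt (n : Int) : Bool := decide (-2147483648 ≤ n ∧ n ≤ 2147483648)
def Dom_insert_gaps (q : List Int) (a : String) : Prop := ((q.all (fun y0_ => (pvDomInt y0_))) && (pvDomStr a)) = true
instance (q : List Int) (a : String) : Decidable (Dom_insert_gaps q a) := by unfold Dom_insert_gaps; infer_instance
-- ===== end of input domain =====

-- B builds an index table of non-gap positions and scatters q into a pre-sized buffer, instead of A's append loop with a running counter (alternative decomposition, same cost); return value only.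


-- ===== PORT A =====
-- A's loop: running counter iq, append None for '-', else q[iq].
-- q[iq] is ported as (pyGet? …).getD 0; inside Pre_ the index is always in range, so the default is never used.
def insertGapsGo (q : List Int) (iq : Nat) : List Char → List (Option Int)
  | [] => []
  | c :: rest =>
      if c = '-' then none :: insertGapsGo q iq rest
      else some ((PySem.List.pyGet? q (iq : Int)).getD 0) :: insertGapsGo q (iq + 1) rest

def insert_gaps (q : List Int) (a : String) : List (Option Int) :=
  insertGapsGo q 0 a.toList

-- ===== PORT B =====
-- positions = [i for i, aa in enumerate(a) if aa not in '-']
def posList : List Char → Nat → List Nat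
  | [], _ => []
  | c :: rest, i => if c = '-' then posList rest (i + 1) else i :: posList rest (i + 1)

-- for k, pos in enumerate(positions): result[pos] = q[k]
def scatterQ (q : List Int) : List (Option Int) → List Nat → Nat → List (Option Int)
  | r, [], _ => r
  | r, pos :: ps, k => scatterQ q (r.set pos (some ((PySem.List.pyGet? q (k : Int)).getD 0))) ps (k + 1)

def insert_gaps_alt (q : List Int) (a : String) : List (Option Int) :=
  scatterQ q (List.replicate a.toList.length none) (posList a.toList 0) 0

-- ===== PRECONDITION & SPEC =====
-- Pre_ excludes exactly the inputs where q has fewer elements than a has non-gap characters: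
-- there the Python A (and B alike) raises IndexError.
def Pre_insert_gaps (q : List Int) (a : String) : Prop :=
  (a.toList.filter (fun c => c ≠ '-')).length ≤ q.length
instance (q : List Int) (a : String) : Decidable (Pre_insert_gaps q a) := by
  unfold Pre_insert_gaps; infer_instance

def pvWitness_insert_gaps : List Int × String := ([3, 7], "a-b")

def Spec_insert_gaps (q : List Int) (a : String) (out : List (Option Int)) : Prop := out = insert_gaps_alt q a
instance (q : List Int) (a : String) (out : List (Option Int)) : Decidable (Spec_insert_gaps q a out) := by unfold Spec_insert_gaps; infer_instance

-- ===== CLAIM (what is proved, stated in full; the proofs are below) =====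
def Claim_equal_insert_gaps : Prop := ∀ (q : List Int) (a : String), Dom_insert_gaps q a → Pre_insert_gaps q a → Spec_insert_gaps q a (insert_gaps q a)

-- ===== LEMMAS AND PROOFS =====

-- Scattering q into pre ++ [None]*len(cs) at the positions of cs offset by pre.length,
-- with q-index starting at k, leaves pre intact and fills the tail exactly as A's loop does.
theorem scatter_eq_go (q : List Int) (cs : List Char) :
    ∀ (pre : List (Option Int)) (k : Nat),
      scatterQ q (pre ++ List.replicate cs.length none) (posList cs pre.length) k
        = pre ++ insertGapsGo q k cs := by
  induction cs with
  | nil => intro pre k; simp [posList, scatterQ, insertGapsGo]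
  | cons c rest ih =>
    intro pre k
    by_cases hc : c = '-'
    · have h1 : pre ++ List.replicate (c :: rest).length none
          = (pre ++ [none]) ++ List.replicate rest.length none := by
        simp [List.replicate_succ]
      have h2 : pre.length + 1 = (pre ++ [(none : Option Int)]).length := by simp
      rw [posList, if_pos hc, h1, h2, ih]
      simp [insertGapsGo, hc]
    · rw [posList, if_neg hc]
      rw [scatterQ]
      have hset : (pre ++ List.replicate (c :: rest).length none).set pre.length
            (some ((PySem.List.pyGet? q (k : Int)).getD 0))
          = (pre ++ [some ((PySem.List.pyGet? q (k : Int)).getD 0)]) ++ List.replicate rest.length none := by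
        rw [List.set_append]
        simp [List.replicate_succ]
      have h2 : pre.length + 1 = (pre ++ [some ((PySem.List.pyGet? q (k : Int)).getD 0)]).length := by simp
      rw [hset, h2, ih]
      simp [insertGapsGo, hc]

-- ===== VERDICT (by name: the statement is the Claim_ definition above) =====
theorem insert_gaps_spec : Claim_equal_insert_gaps := by
  intro q a _ _
  unfold Spec_insert_gaps insert_gaps insert_gaps_alt
  have := scatter_eq_go q a.toList [] 0
  simpa using this.symm
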